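-- pv_equiv track=rewrite | github.com/XS-MLVP/UnityChipForXiangShan | ut_frontend/bpu/tagesc/env/fake_global_history.py | calc_fh
-- ===== SOURCE A (Python) =====
-- GLOBAL_HISTORY_LEN = 256
--
-- def calc_fh(full_hist: int, folded_len: int, hist_len: int) -> int:
--     if folded_len == 0:
--         return 0
--     res = 0
--     g = full_hist & ((1 << hist_len) - 1)
--     mask = (1 << folded_len) - 1
--     for _ in range(0, min(GLOBAL_HISTORY_LEN, hist_len), folded_len):
--         res ^= g & mask
--         g >>= folded_len
--
--     return res
-- ===== SOURCE B (Python) =====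
-- GLOBAL_HISTORY_LEN = 256
--
--
-- def _fold_chunks(g, folded_len, n):
--     # XOR of the n low chunks of folded_len bits of g, by divide and conquer.
--     if n <= 0:
--         return 0
--     if n == 1:
--         return g & ((1 << folded_len) - 1)
--     k = n // 2
--     lo = g & ((1 << (k * folded_len)) - 1)
--     hi = g >> (k * folded_len)
--     return _fold_chunks(lo, folded_len, k) ^ _fold_chunks(hi, folded_len, n - k)
--
--
-- def calc_fh(full_hist: int, folded_len: int, hist_len: int) -> int:
--     if folded_len == 0:
--         return 0
--     g = full_hist & ((1 << hist_len) - 1)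
--     n = len(range(0, min(GLOBAL_HISTORY_LEN, hist_len), folded_len))
--     return _fold_chunks(g, folded_len, n)
-- ===== Notes on version B (the rewrite author's own statement) =====
-- stated objective: alternative
-- what changed: Replaces A's sequential shift-and-XOR loop over chunks (carrying a mutating shifted copy of the history) by a recursive divide-and-conquer fold: the chunk count is computed up front as len(range(...)) and the masked history is split into low/high halves whose chunk-XORs are combined, with no running shifted accumulator.
import Mathlib
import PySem

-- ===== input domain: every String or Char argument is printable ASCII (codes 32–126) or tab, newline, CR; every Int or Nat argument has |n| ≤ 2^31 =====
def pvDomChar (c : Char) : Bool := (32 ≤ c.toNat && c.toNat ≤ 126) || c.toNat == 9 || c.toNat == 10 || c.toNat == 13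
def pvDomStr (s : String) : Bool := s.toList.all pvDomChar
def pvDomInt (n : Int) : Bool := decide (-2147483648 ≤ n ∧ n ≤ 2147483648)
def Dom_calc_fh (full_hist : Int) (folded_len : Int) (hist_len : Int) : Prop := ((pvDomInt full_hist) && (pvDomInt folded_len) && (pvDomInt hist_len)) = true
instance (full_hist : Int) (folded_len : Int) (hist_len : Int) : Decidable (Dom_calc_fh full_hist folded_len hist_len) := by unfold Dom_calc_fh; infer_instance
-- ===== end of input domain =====

-- B replaces A's sequential shift-and-XOR loop by a divide-and-conquer chunk fold (alternative decomposition, not faster).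
-- ===== PORT A =====
-- Literal port of A: a fold over range(0, min(256, hist_len), folded_len) carrying (res, g),
-- XORing the masked low chunk into res and shifting g right each step.
-- '.toNat' on the shift amounts: Python raises on a negative shift count; Pre_ excludes those inputs.
def calc_fh (full_hist : Int) (folded_len : Int) (hist_len : Int) : Int :=
  if folded_len = 0 then 0
  else
    let g := PySem.Int.band full_hist ((1 <<< hist_len.toNat) - 1)
    let mask := (1 <<< folded_len.toNat) - 1
    ((PySem.List.pyRange 0 (min 256 hist_len) folded_len).foldl
      (fun st _ => (PySem.Int.bxor st.1 (PySem.Int.band st.2 mask), st.2 >>> folded_len.toNat))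
      ((0 : Int), g)).1

-- ===== PORT B =====
-- Port of Source B's _fold_chunks: divide and conquer on the chunk count n.
def foldChunksB (g : Int) (folded_len : Int) (n : Int) : Int :=
  if _h0 : n ≤ 0 then 0
  else if _h1 : n = 1 then PySem.Int.band g ((1 <<< folded_len.toNat) - 1)
  else
    let k := PySem.Int.floordiv n 2
    PySem.Int.bxor
      (foldChunksB (PySem.Int.band g ((1 <<< (k * folded_len).toNat) - 1)) folded_len k)
      (foldChunksB (g >>> (k * folded_len).toNat) folded_len (n - k))
termination_by n.toNat
decreasing_by
  · have hk : PySem.Int.floordiv n 2 = n / 2 := PySem.Int.floordiv_eq_ediv_of_pos (by omega)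
    rw [hk]; omega
  · have hk : PySem.Int.floordiv n 2 = n / 2 := PySem.Int.floordiv_eq_ediv_of_pos (by omega)
    rw [hk]; omega

def calc_fh_alt (full_hist : Int) (folded_len : Int) (hist_len : Int) : Int :=
  if folded_len = 0 then 0
  else
    let g := PySem.Int.band full_hist ((1 <<< hist_len.toNat) - 1)
    let n := PySem.List.len (PySem.List.pyRange 0 (min 256 hist_len) folded_len)
    foldChunksB g folded_len n

-- ===== PRECONDITION & SPEC =====
-- Pre_ excludes exactly the inputs on which Python A raises ValueError (a negative shift count):
-- folded_len < 0, or folded_len > 0 with hist_len < 0. With folded_len = 0 A returns 0 before any shift.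
def Pre_calc_fh (full_hist : Int) (folded_len : Int) (hist_len : Int) : Prop :=
  folded_len = 0 ∨ (0 < folded_len ∧ 0 ≤ hist_len)
instance (full_hist : Int) (folded_len : Int) (hist_len : Int) : Decidable (Pre_calc_fh full_hist folded_len hist_len) := by unfold Pre_calc_fh; infer_instance

def pvWitness_calc_fh : Int × Int × Int := (5, 3, 8)

def Spec_calc_fh (full_hist : Int) (folded_len : Int) (hist_len : Int) (out : Int) : Prop := out = calc_fh_alt full_hist folded_len hist_len
instance (full_hist : Int) (folded_len : Int) (hist_len : Int) (out : Int) : Decidable (Spec_calc_fh full_hist folded_len hist_len out) := by unfold Spec_calc_fh; infer_instance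

-- ===== CLAIM (what is proved, stated in full; the proofs are below) =====
def Claim_equal_calc_fh : Prop := ∀ (full_hist : Int) (folded_len : Int) (hist_len : Int), Dom_calc_fh full_hist folded_len hist_len → Pre_calc_fh full_hist folded_len hist_len → Spec_calc_fh full_hist folded_len hist_len (calc_fh full_hist folded_len hist_len)
-- ===== LEMMAS AND PROOFS =====

-- Nat-level spec of the chunk XOR: SN F G n = XOR of the n low F-bit chunks of G.
def SN (F : Nat) : Nat → Nat → Nat
  | _, 0 => 0
  | G, n + 1 => (G &&& (2 ^ F - 1)) ^^^ SN F (G >>> F) n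

-- Nat-level mirror of foldChunksB (fuel = chunk count).
def BN (F G n : Nat) : Nat :=
  if n = 0 then 0
  else if n = 1 then G &&& (2 ^ F - 1)
  else BN F (G &&& (2 ^ (n / 2 * F) - 1)) (n / 2) ^^^ BN F (G >>> (n / 2 * F)) (n - n / 2)
termination_by n
decreasing_by all_goals omega

theorem and_and_mask (G F m : Nat) (h : F ≤ m) :
    (G &&& (2 ^ m - 1)) &&& (2 ^ F - 1) = G &&& (2 ^ F - 1) := by
  apply Nat.eq_of_testBit_eq
  intro i
  simp only [Nat.testBit_and, Nat.testBit_two_pow_sub_one]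
  by_cases hi : i < F
  · simp [hi, show i < m by omega]
  · simp [hi]

theorem and_mask_shift (G F m : Nat) (h : F ≤ m) :
    (G &&& (2 ^ m - 1)) >>> F = (G >>> F) &&& (2 ^ (m - F) - 1) := by
  apply Nat.eq_of_testBit_eq
  intro j
  simp only [Nat.testBit_shiftRight, Nat.testBit_and, Nat.testBit_two_pow_sub_one]
  by_cases hj : j < m - F
  · simp [hj, show F + j < m by omega]
  · simp [hj, show ¬ F + j < m by omega]

theorem SN_split (F : Nat) (k m G : Nat) :
    SN F G (k + m) = SN F (G &&& (2 ^ (k * F) - 1)) k ^^^ SN F (G >>> (k * F)) m := by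
  induction k generalizing G with
  | zero => simp [SN]
  | succ k ih =>
    have hstep : k + 1 + m = (k + m) + 1 := by omega
    rw [hstep]
    show (G &&& (2 ^ F - 1)) ^^^ SN F (G >>> F) (k + m) = _
    rw [ih (G >>> F)]
    have hmul : (k + 1) * F = k * F + F := by rw [Nat.succ_mul]
    have e1 : (G &&& (2 ^ ((k + 1) * F) - 1)) &&& (2 ^ F - 1) = G &&& (2 ^ F - 1) :=
      and_and_mask G F ((k + 1) * F) (by omega)
    have e2 : (G &&& (2 ^ ((k + 1) * F) - 1)) >>> F = (G >>> F) &&& (2 ^ (k * F) - 1) := by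
      rw [and_mask_shift G F ((k + 1) * F) (by omega)]
      rw [show (k + 1) * F - F = k * F from by omega]
    have e3 : G >>> ((k + 1) * F) = (G >>> F) >>> (k * F) := by
      rw [← Nat.shiftRight_add]
      rw [show F + k * F = (k + 1) * F from by omega]
    show _ = ((G &&& (2 ^ ((k + 1) * F) - 1)) &&& (2 ^ F - 1)) ^^^
        SN F ((G &&& (2 ^ ((k + 1) * F) - 1)) >>> F) k ^^^ SN F (G >>> ((k + 1) * F)) m
    rw [e1, e2, e3, Nat.xor_assoc]

theorem BN_eq_SN (F : Nat) (G n : Nat) : BN F G n = SN F G n := by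
  induction n using Nat.strong_induction_on generalizing G with
  | _ n ih =>
    match n with
    | 0 => simp [BN, SN]
    | 1 => simp [BN, SN]
    | (m + 2) =>
      rw [BN]
      simp only [show ¬ (m + 2 = 0) by omega, show ¬ (m + 2 = 1) by omega, if_false]
      rw [ih ((m + 2) / 2) (by omega), ih ((m + 2) - (m + 2) / 2) (by omega),
        ← SN_split F ((m + 2) / 2) ((m + 2) - (m + 2) / 2) G]
      congr 1
      omega

theorem int_mask_cast' (m : Nat) : (((1 <<< m : Nat) : Int)) - 1 = (((2 ^ m - 1 : Nat)) : Int) := by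
  rw [Nat.one_shiftLeft]
  have h : 1 ≤ 2 ^ m := Nat.one_le_two_pow
  push_cast [h]
  ring

theorem cast_pow_sub_one (m : Nat) : (((2 ^ m : Nat)) : Int) - 1 = (((2 ^ m - 1 : Nat)) : Int) := by
  have h : 1 ≤ 2 ^ m := Nat.one_le_two_pow
  push_cast [h]
  ring

theorem int_shiftRight_natCast (G F : Nat) : ((G : Int) >>> F) = ((G >>> F : Nat) : Int) := by
  exact_mod_cast rfl

-- A's loop only uses the length of the range list: its fold from state (↑R, ↑G) returns ↑(R ^^^ SN F G len).
theorem foldA (F : Nat) (l : List Int) (R G : Nat) :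
    ((l.foldl
      (fun st _ => (PySem.Int.bxor st.1 (PySem.Int.band st.2 (((2 ^ F - 1 : Nat)) : Int)), st.2 >>> F))
      (((R : Nat) : Int), ((G : Nat) : Int))).1 : Int) = ((R ^^^ SN F G l.length : Nat) : Int) := by
  induction l generalizing R G with
  | nil => simp [SN]
  | cons x l ih =>
    simp only [List.foldl_cons, List.length_cons]
    rw [PySem.Int.band_natCast, PySem.Int.bxor_natCast, int_shiftRight_natCast, ih]
    rw [show SN F G (l.length + 1) = (G &&& (2 ^ F - 1)) ^^^ SN F (G >>> F) l.length from rfl]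
    rw [Nat.xor_assoc]

theorem foldChunksB_cast (F : Nat) (N : Nat) : ∀ (n : Int), n.toNat ≤ N → ∀ (G : Nat),
    foldChunksB ((G : Nat) : Int) ((F : Nat) : Int) n = ((BN F G n.toNat : Nat) : Int) := by
  induction N with
  | zero =>
    intro n hn G
    rw [foldChunksB, BN]
    simp [show n ≤ 0 by omega, show n.toNat = 0 by omega]
  | succ N ih =>
    intro n hn G
    rw [foldChunksB, BN]
    by_cases h0 : n ≤ 0
    · simp [h0, show n.toNat = 0 by omega]
    · simp only [dif_neg h0]
      by_cases h1 : n = 1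
      · subst h1
        simp only [dite_true, if_true, Int.toNat_natCast, Int.toNat_one,
          if_neg (by omega : ¬ (1 = 0))]
        rw [int_mask_cast', PySem.Int.band_natCast]
      · simp only [dif_neg h1]
        have h2 : 2 ≤ n := by omega
        have hk : PySem.Int.floordiv n 2 = ((n.toNat / 2 : Nat) : Int) := by
          rw [show n = ((n.toNat : Nat) : Int) from by omega]
          exact_mod_cast PySem.Int.floordiv_natCast n.toNat 2
        have hkF : ((PySem.Int.floordiv n 2) * ((F : Nat) : Int)).toNat = n.toNat / 2 * F := by
          rw [hk]; exact_mod_cast Int.toNat_natCast _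
        rw [hkF, int_mask_cast', PySem.Int.band_natCast, int_shiftRight_natCast]
        rw [ih (PySem.Int.floordiv n 2) (by rw [hk]; omega),
            ih (n - PySem.Int.floordiv n 2) (by rw [hk]; omega),
            PySem.Int.bxor_natCast]
        rw [show (PySem.Int.floordiv n 2).toNat = n.toNat / 2 from by rw [hk]; omega,
            show (n - PySem.Int.floordiv n 2).toNat = n.toNat - n.toNat / 2 from by rw [hk]; omega]
        simp only [if_neg (by omega : ¬ (n.toNat = 0)), if_neg (by omega : ¬ (n.toNat = 1))]

-- ===== VERDICT (by name: the statement is the Claim_ definition above) =====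
theorem calc_fh_spec : Claim_equal_calc_fh := by
  intro full_hist folded_len hist_len _hdom hpre
  unfold Spec_calc_fh
  rcases hpre with h0 | ⟨hf, hh⟩
  · simp [calc_fh, calc_fh_alt, h0]
  · have hfne : ¬ (folded_len = 0) := by omega
    rw [calc_fh, calc_fh_alt, if_neg hfne, if_neg hfne]
    simp only [Nat.one_shiftLeft, cast_pow_sub_one]
    set g := PySem.Int.band full_hist (((2 ^ hist_len.toNat - 1 : Nat)) : Int) with hg
    have hgnn : 0 ≤ g := by
      rw [hg, PySem.Int.band_comm]
      apply PySem.Int.band_nonneg_of_nonneg_left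
      exact_mod_cast Nat.zero_le _
    have hgG : g = ((g.toNat : Nat) : Int) := by omega
    have hF : folded_len = ((folded_len.toNat : Nat) : Int) := by omega
    set l := PySem.List.pyRange 0 (min 256 hist_len) folded_len with hl
    have hA := foldA folded_len.toNat l 0 g.toNat
    simp only [← hgG, Nat.cast_zero, Nat.zero_xor] at hA
    rw [hA]
    have hlen : PySem.List.len l = ((l.length : Nat) : Int) := by
      rw [PySem.List.len_eq]
    rw [hlen]
    conv_rhs => rw [hgG, hF]
    rw [foldChunksB_cast folded_len.toNat l.length _ (by simp)]
    rw [show (((l.length : Nat) : Int)).toNat = l.length from by simp]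
    rw [BN_eq_SN]
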